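-- pv_equiv track=rewrite | github.com/OllieKampo/aloy | python/aloy/auxiliary/moreitertools.py | cycle_to
-- ===== SOURCE A (Python) =====
-- from typing import (Callable, Generic, Iterable, Iterator, Optional, Sequence,
--                     Type, TypeVar, final, overload)
--
-- VT = TypeVar("VT")
--
-- def cycle_to(
--     sequence: Sequence[VT],
--     len_: int, /
-- ) -> Iterator[VT]:
--     """Cycle through the given sequence to a given length."""
--     if len_ < 0:
--         raise ValueError("Length must be a non-negative integer.")
--     if len_ > 0:
--         yield from (sequence[i % len(sequence)] for i in range(len_))
-- ===== SOURCE B (Python) =====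
-- def cycle_to(sequence, len_, /):
--     """Cycle through the given sequence to a given length."""
--     if len_ < 0:
--         raise ValueError("Length must be a non-negative integer.")
--     if len_ > 0:
--         full, rem = divmod(len_, len(sequence))
--         for _ in range(full):
--             yield from sequence
--         yield from sequence[:rem]
-- ===== Notes on version B (the rewrite author's own statement) =====
-- stated objective: faster
-- what changed: Replaces the per-index modulo comprehension with divmod plus whole-sequence repetitions and a tail slice, removing the per-element index arithmetic.
import Mathlib
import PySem

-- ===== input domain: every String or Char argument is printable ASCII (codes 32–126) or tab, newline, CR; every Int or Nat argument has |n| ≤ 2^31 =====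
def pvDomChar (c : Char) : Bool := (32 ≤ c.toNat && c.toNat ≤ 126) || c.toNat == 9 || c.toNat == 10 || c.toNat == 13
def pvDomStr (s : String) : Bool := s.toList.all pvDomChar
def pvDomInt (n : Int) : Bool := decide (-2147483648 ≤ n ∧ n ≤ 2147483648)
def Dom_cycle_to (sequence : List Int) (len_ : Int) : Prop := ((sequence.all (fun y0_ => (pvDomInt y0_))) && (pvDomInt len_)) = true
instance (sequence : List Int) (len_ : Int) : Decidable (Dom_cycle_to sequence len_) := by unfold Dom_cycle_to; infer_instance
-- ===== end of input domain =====

-- B replaces A's per-index modulo comprehension with divmod + whole-sequence repetitions + a tail slice (constant-factor faster: no per-element index arithmetic).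

-- ===== PORT A =====
-- Literal port of A: guard len_ < 0 (ValueError, excluded by Pre_), then
-- [sequence[i % len(sequence)] for i in range(len_)]; the modulo-by-zero case is excluded by Pre_.
def cycle_to (sequence : List Int) (len_ : Int) : List Int :=
  if len_ < 0 then []
  else if len_ > 0 then
    (PySem.List.pyRange 0 len_ 1).map
      (fun i => PySem.List.pyGetD sequence (PySem.Int.mod i (sequence.length : Int)) 0)
  else []

-- ===== PORT B =====
-- Literal port of Source B: full, rem = divmod(len_, len(sequence)); repeat the whole
-- sequence 'full' times, then the slice sequence[:rem].
def cycle_to_alt (sequence : List Int) (len_ : Int) : List Int :=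
  if len_ < 0 then []
  else if len_ > 0 then
    let full := PySem.Int.floordiv len_ (sequence.length : Int)
    let rem := PySem.Int.mod len_ (sequence.length : Int)
    ((PySem.List.pyRange 0 full 1).foldl (fun acc _ => acc ++ sequence) [])
      ++ PySem.List.slice sequence none (some rem)
  else []

-- ===== PRECONDITION & SPEC =====
-- Pre_ excludes exactly the inputs where A raises: len_ < 0 (ValueError) and
-- len_ > 0 with an empty sequence (ZeroDivisionError from i % 0); B raises there too.
def Pre_cycle_to (sequence : List Int) (len_ : Int) : Prop :=
  0 ≤ len_ ∧ (0 < len_ → sequence ≠ [])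
instance (sequence : List Int) (len_ : Int) : Decidable (Pre_cycle_to sequence len_) := by
  unfold Pre_cycle_to; infer_instance
def pvWitness_cycle_to : List Int × Int := ([1, 2, 3], 7)

def Spec_cycle_to (sequence : List Int) (len_ : Int) (out : List Int) : Prop := out = cycle_to_alt sequence len_
instance (sequence : List Int) (len_ : Int) (out : List Int) : Decidable (Spec_cycle_to sequence len_ out) := by unfold Spec_cycle_to; infer_instance

-- ===== CLAIM (what is proved, stated in full; the proofs are below) =====
def Claim_equal_cycle_to : Prop := ∀ (sequence : List Int) (len_ : Int), Dom_cycle_to sequence len_ → Pre_cycle_to sequence len_ → Spec_cycle_to sequence len_ (cycle_to sequence len_)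

-- ===== LEMMAS AND PROOFS =====

-- repeated append of the whole sequence, as B's loop builds it
def repApp (seq : List Int) (q : Nat) : List Int :=
  (List.range q).foldl (fun acc _ => acc ++ seq) []

theorem repApp_succ (seq : List Int) (q : Nat) :
    repApp seq (q + 1) = repApp seq q ++ seq := by
  simp [repApp, List.range_succ]

-- core identity over Nat: per-index modulo = whole repetitions + tail prefix
theorem range_mod_eq_rep_take (seq : List Int) (hseq : seq ≠ []) (L : Nat) :
    (List.range L).map (fun i => seq.getD (i % seq.length) 0)
      = repApp seq (L / seq.length) ++ seq.take (L % seq.length) := by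
  induction L with
  | zero => simp [repApp]
  | succ L ih =>
    have hn : 0 < seq.length := List.length_pos_iff.mpr hseq
    rw [List.range_succ, List.map_append, ih]
    have hmlt : L % seq.length < seq.length := Nat.mod_lt _ hn
    have htake : seq.take (L % seq.length + 1)
        = seq.take (L % seq.length) ++ [seq[L % seq.length]] := by
      rw [List.take_add_one, List.getElem?_eq_getElem hmlt]; rfl
    by_cases hlast : L % seq.length + 1 = seq.length
    · have hL : L + 1 = (L / seq.length + 1) * seq.length := by
        have h := Nat.div_add_mod' L seq.length
        have : L + 1 = L / seq.length * seq.length + seq.length := by omega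
        rw [this]; ring
      have hdiv : (L + 1) / seq.length = L / seq.length + 1 := by
        rw [hL, Nat.mul_div_cancel _ hn]
      have hmod : (L + 1) % seq.length = 0 := by
        rw [hL, Nat.mul_mod_left]
      have hfull : seq.take (L % seq.length) ++ [seq[L % seq.length]] = seq := by
        rw [← htake, hlast, List.take_length]
      rw [hdiv, hmod, repApp_succ]
      simp [List.getElem?_eq_getElem hmlt, List.append_assoc, hfull]
    · have hL : L + 1 = (L % seq.length + 1) + L / seq.length * seq.length := by
        have := Nat.div_add_mod' L seq.length; omega
      have hmod : (L + 1) % seq.length = L % seq.length + 1 := by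
        rw [hL, Nat.add_mul_mod_self_right, Nat.mod_eq_of_lt (by omega)]
      have hdiv : (L + 1) / seq.length = L / seq.length := by
        rw [hL, Nat.add_mul_div_right _ _ hn, Nat.div_eq_of_lt (by omega), Nat.zero_add]
      rw [hdiv, hmod, htake]
      simp [List.getElem?_eq_getElem hmlt, List.append_assoc]

-- ===== VERDICT (by name: the statement is the Claim_ definition above) =====
theorem cycle_to_spec : Claim_equal_cycle_to := by
  intro seq len_ _ hpre
  obtain ⟨hle, hne⟩ := hpre
  unfold Spec_cycle_to cycle_to cycle_to_alt
  by_cases hpos : 0 < len_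
  · have hseq : seq ≠ [] := hne hpos
    rw [if_neg (by omega), if_pos hpos, if_neg (by omega), if_pos hpos]
    obtain ⟨L, rfl⟩ : ∃ L : Nat, len_ = (L : Int) := ⟨len_.toNat, by omega⟩
    simp only [PySem.Int.floordiv_natCast, PySem.Int.mod_natCast,
      PySem.List.pyRange_zero_natCast, PySem.List.slice_to_natCast,
      List.map_map, List.foldl_map]
    have hmap : (List.range L).map
        ((fun i => PySem.List.pyGetD seq (PySem.Int.mod i (seq.length : Int)) 0) ∘
          (fun k : Nat => (k : Int)))
        = (List.range L).map (fun i => seq.getD (i % seq.length) 0) := by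
      apply List.map_congr_left
      intro k _
      simp only [Function.comp_apply, PySem.Int.mod_natCast, PySem.List.pyGetD_natCast]
    rw [hmap, range_mod_eq_rep_take seq hseq L]
    rfl
  · have hz : len_ = 0 := by omega
    simp [hz]
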